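-- pv_equiv track=rewrite | github.com/teofanaenachioiu/University-Courses | FP/Utils/Divide et impera/main.py | prod3i
-- ===== SOURCE A (Python) =====
-- def prod3i(l,st,dr):
--     if dr<st:
--         return 1
--     if dr-st==0:
--         if st%3==0:
--             return l[st]
--         else:
--             return 1
--     m=(dr+st)//2
--     return prod3i(l, st, m)*prod3i(l, m+1, dr)
-- ===== SOURCE B (Python) =====
-- def prod3i(l, st, dr):
--     prod = 1
--     for i in range(st, dr + 1):
--         if i % 3 == 0:
--             prod *= l[i]
--     return prod
-- ===== Notes on version B (the rewrite author's own statement) =====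
-- stated objective: simpler
-- what changed: Replaced the divide-and-conquer recursion that splits the index range at its midpoint with a single iterative pass over range(st, dr+1) accumulating the product of elements at indices divisible by 3.
import Mathlib
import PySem

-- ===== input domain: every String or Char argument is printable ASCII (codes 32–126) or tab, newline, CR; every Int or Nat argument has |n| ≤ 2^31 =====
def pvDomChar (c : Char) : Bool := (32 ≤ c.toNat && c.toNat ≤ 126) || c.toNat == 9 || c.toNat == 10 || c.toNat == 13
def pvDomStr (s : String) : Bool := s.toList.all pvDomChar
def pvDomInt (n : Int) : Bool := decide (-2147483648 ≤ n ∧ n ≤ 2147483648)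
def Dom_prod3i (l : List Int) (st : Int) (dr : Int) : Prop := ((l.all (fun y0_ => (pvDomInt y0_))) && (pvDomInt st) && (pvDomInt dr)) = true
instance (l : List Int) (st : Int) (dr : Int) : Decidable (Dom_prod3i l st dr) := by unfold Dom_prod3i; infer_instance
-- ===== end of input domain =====

-- B replaces A's midpoint-splitting divide-and-conquer with a single iterative
-- pass over the index range (objective: simpler).

-- ===== PORT A =====
-- literal transliteration of A's divide-and-conquer recursion;
-- l[st] is Python indexing, exact via pyGet? (Pre_ keeps accessed indices in range)
def prod3i (l : List Int) (st : Int) (dr : Int) : Int :=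
  if dr < st then 1
  else if dr - st = 0 then
    if PySem.Int.mod st 3 = 0 then (PySem.List.pyGet? l st).getD 0 else 1
  else
    let m := PySem.Int.floordiv (dr + st) 2
    prod3i l st m * prod3i l (m + 1) dr
termination_by (dr - st).toNat
decreasing_by
  · have h1 := PySem.Int.floordiv_two_mid_bounds (lo := st) (hi := dr) (by omega)
    have h2 : PySem.Int.floordiv (dr + st) 2 < dr := by
      rw [PySem.Int.floordiv_lt_iff_lt_mul (by omega)]; omega
    rw [add_comm dr st] at *; omega
  · have h1 := PySem.Int.floordiv_two_mid_bounds (lo := st) (hi := dr) (by omega)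
    rw [add_comm dr st] at *; omega

-- ===== PORT B =====
-- literal transliteration of Source B: one loop over range(st, dr+1), accumulator prod
def prod3i_alt (l : List Int) (st : Int) (dr : Int) : Int :=
  (PySem.List.pyRange st (dr + 1) 1).foldl
    (fun prod i =>
      if PySem.Int.mod i 3 = 0 then prod * (PySem.List.pyGet? l i).getD 0 else prod) 1

-- ===== PRECONDITION & SPEC =====
-- Pre_ excludes exactly the inputs where Python raises IndexError (both A and B do):
-- some index i in [st, dr] with i % 3 == 0 falls outside the valid index range of l.
-- closed form: lo/hi are the smallest/largest multiples of 3 in [st, dr];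
-- if such multiples exist (lo ≤ hi) they must all be valid Python indices of l
def Pre_prod3i (l : List Int) (st : Int) (dr : Int) : Prop :=
  st + PySem.Int.mod (-st) 3 ≤ dr - PySem.Int.mod dr 3 →
    (-(l.length : Int) ≤ st + PySem.Int.mod (-st) 3 ∧ dr - PySem.Int.mod dr 3 < (l.length : Int))
instance (l : List Int) (st : Int) (dr : Int) : Decidable (Pre_prod3i l st dr) := by
  unfold Pre_prod3i; infer_instance

def pvWitness_prod3i : List Int × Int × Int := ([2, 3, 4], 0, 2)

def Spec_prod3i (l : List Int) (st : Int) (dr : Int) (out : Int) : Prop := out = prod3i_alt l st dr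
instance (l : List Int) (st : Int) (dr : Int) (out : Int) : Decidable (Spec_prod3i l st dr out) := by unfold Spec_prod3i; infer_instance

-- ===== CLAIM (what is proved, stated in full; the proofs are below) =====
def Claim_equal_prod3i : Prop := ∀ (l : List Int) (st : Int) (dr : Int), Dom_prod3i l st dr → Pre_prod3i l st dr → Spec_prod3i l st dr (prod3i l st dr)

-- ===== LEMMAS AND PROOFS =====

-- the per-index factor both programs multiply in
def pvFac (l : List Int) (i : Int) : Int :=
  if PySem.Int.mod i 3 = 0 then (PySem.List.pyGet? l i).getD 0 else 1

theorem pvFoldl_mul (l : List Int) (xs : List Int) (a : Int) :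
    xs.foldl (fun prod i =>
      if PySem.Int.mod i 3 = 0 then prod * (PySem.List.pyGet? l i).getD 0 else prod) a
      = a * (xs.map (pvFac l)).prod := by
  induction xs generalizing a with
  | nil => simp
  | cons x xs ih =>
    simp only [List.foldl_cons, List.map_cons, List.prod_cons, ih, pvFac]
    split_ifs <;> ring

theorem pvAlt_eq (l : List Int) (st dr : Int) :
    prod3i_alt l st dr = ((PySem.List.pyRange st (dr + 1) 1).map (pvFac l)).prod := by
  unfold prod3i_alt
  rw [pvFoldl_mul]; ring

theorem pvA_eq : ∀ (n : Nat) (l : List Int) (st dr : Int), (dr - st).toNat = n →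
    prod3i l st dr = ((PySem.List.pyRange st (dr + 1) 1).map (pvFac l)).prod := by
  intro n
  induction n using Nat.strong_induction_on with
  | _ n ih =>
    intro l st dr hn
    rw [prod3i]
    by_cases h1 : dr < st
    · simp only [if_pos h1]
      rw [PySem.List.pyRange_one_eq_nil (by omega)]
      simp
    · by_cases h2 : dr - st = 0
      · simp only [if_neg h1, if_pos h2]
        have hdr : dr = st := by omega
        subst hdr
        rw [PySem.List.pyRange_one_singleton]
        simp only [List.map_cons, List.map_nil, List.prod_cons, List.prod_nil, mul_one, pvFac]
      · simp only [if_neg h1, if_neg h2]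
        have hlt : st < dr := by omega
        set m := PySem.Int.floordiv (dr + st) 2 with hm
        have hmb : st ≤ m ∧ m < dr := by
          have h1 := PySem.Int.floordiv_two_mid_bounds (lo := st) (hi := dr) (le_of_lt hlt)
          have h2 : PySem.Int.floordiv (st + dr) 2 < dr := by
            rw [PySem.Int.floordiv_lt_iff_lt_mul (by omega)]; omega
          rw [add_comm st dr] at h1 h2
          exact ⟨h1.1, h2⟩
        rw [ih (m - st).toNat (by omega) l st m rfl,
            ih (dr - (m + 1)).toNat (by omega) l (m + 1) dr rfl]
        rw [PySem.List.pyRange_one_append (a := st) (m := m + 1) (b := dr + 1)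
              (by omega) (by omega)]
        rw [List.map_append, List.prod_append]

-- ===== VERDICT (by name: the statement is the Claim_ definition above) =====
theorem prod3i_spec : Claim_equal_prod3i := by
  intro l st dr _ _
  unfold Spec_prod3i
  rw [pvAlt_eq, pvA_eq (dr - st).toNat l st dr rfl]
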